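-- pv_equiv track=rewrite | github.com/ddevaul/genomcics_final_proj | calculate_features.py | generate_sequence_variations
-- ===== SOURCE A (Python) =====
-- import itertools
-- import itertools
--
-- def generate_sequence_variations(sequence):
--     """
--     Generate all possible variations of a sequence by replacing N with each nucleotide.
--     Only handles sequences with a reasonable number of Ns to avoid combinatorial explosion.
--     """
--     # Count number of Ns
--     n_count = sequence.count('N')
--
--     # If too many Ns, return the original sequence
--     # (this is a safety check to avoid memory issues)
--     if n_count > 5:  # Reduced from 10 to 5 to limit memory usage
--         return [sequence]
--
--     # No Ns, return original
--     if n_count == 0: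
--         return [sequence]
--
--     # Generate all possible combinations of ACGT for each N
--     variations = []
--     nucleotides = ['A', 'C', 'G', 'T']
--
--     # Find positions of all Ns
--     n_positions = [i for i, char in enumerate(sequence) if char == 'N']
--
--     # Generate all combinations of nucleotides for the N positions
--     for combo in itertools.product(nucleotides, repeat=n_count):
--         # Create a new sequence with Ns replaced
--         new_seq = list(sequence)
--         for pos, nucleotide in zip(n_positions, combo):
--             new_seq[pos] = nucleotide
--         variations.append(''.join(new_seq))
--
--     return variations
-- ===== SOURCE B (Python) =====
-- def generate_sequence_variations(sequence):
--     """
--     Generate all possible variations of a sequence by replacing N with each nucleotide.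
--     Recursive decomposition: recurse on the first character, branching on 'N'.
--     """
--     n_count = sequence.count('N')
--     if n_count > 5 or n_count == 0:
--         return [sequence]
--
--     def expand(s):
--         if not s:
--             return ['']
--         rest = expand(s[1:])
--         if s[0] == 'N':
--             return [nt + r for nt in 'ACGT' for r in rest]
--         return [s[0] + r for r in rest]
--
--     return expand(sequence)
-- ===== Notes on version B (the rewrite author's own statement) =====
-- stated objective: simpler
-- what changed: Replaces A's itertools.product over a precomputed list of N-positions plus per-combo list surgery with a single recursion on the string that branches four ways at each 'N', keeping the same guards and output order.
import Mathlib
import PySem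

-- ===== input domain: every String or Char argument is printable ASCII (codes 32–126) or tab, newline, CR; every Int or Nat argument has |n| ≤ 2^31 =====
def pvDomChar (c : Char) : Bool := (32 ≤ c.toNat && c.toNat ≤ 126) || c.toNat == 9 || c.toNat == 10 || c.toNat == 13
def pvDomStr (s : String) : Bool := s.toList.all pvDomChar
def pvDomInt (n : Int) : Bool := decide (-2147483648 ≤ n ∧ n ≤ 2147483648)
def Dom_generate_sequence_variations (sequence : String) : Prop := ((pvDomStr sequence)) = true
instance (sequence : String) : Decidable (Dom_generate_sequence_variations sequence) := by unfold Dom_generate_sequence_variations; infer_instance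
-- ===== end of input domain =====

-- B replaces A's itertools.product over collected N-positions by a direct recursion on the
-- string (branching four ways at each 'N'); same output, simpler decomposition (objective: simpler).

-- ===== PORT A =====
-- itertools.product(['A','C','G','T'], repeat=n): all n-tuples, last coordinate varying fastest
def pvProdRep : Nat → List (List Char)
  | 0 => [[]]
  | n + 1 => (['A', 'C', 'G', 'T'] : List Char).flatMap
      (fun nt => (pvProdRep n).map (fun rest => nt :: rest))

-- inner loop of A: 'for pos, nucleotide in zip(n_positions, combo): new_seq[pos] = nucleotide'
-- (positions are nonnegative in-range indices, so list assignment is List.set)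
def pvApply (seq : List Char) (ps : List Nat) (combo : List Char) : List Char :=
  (ps.zip combo).foldl (fun new_seq pc => new_seq.set pc.1 pc.2) seq

def generate_sequence_variations (sequence : String) : List String :=
  let n_count := PySem.Str.count sequence "N"
  if n_count > 5 then [sequence]
  else if n_count = 0 then [sequence]
  else
    -- n_positions = [i for i, char in enumerate(sequence) if char == 'N'] (indices are ≥ 0, so .toNat is exact)
    let n_positions := (PySem.List.enumerate sequence.toList).filterMap
        (fun p => if p.2 = 'N' then some p.1.toNat else none)
    (pvProdRep n_count).foldl
      (fun variations combo => variations ++ [String.ofList (pvApply sequence.toList n_positions combo)])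
      []

-- ===== PORT B =====
-- expand(s): recurse on the first character; at an 'N' branch over A,C,G,T
def pvExpand : List Char → List (List Char)
  | [] => [[]]
  | c :: cs =>
    let rest := pvExpand cs
    if c = 'N' then (['A', 'C', 'G', 'T'] : List Char).flatMap (fun nt => rest.map (fun r => nt :: r))
    else rest.map (fun r => c :: r)

def generate_sequence_variations_alt (sequence : String) : List String :=
  let n_count := PySem.Str.count sequence "N"
  if n_count > 5 ∨ n_count = 0 then [sequence]
  else (pvExpand sequence.toList).map String.ofList

-- ===== PRECONDITION & SPEC =====
def Spec_generate_sequence_variations (sequence : String) (out : List String) : Prop := out = generate_sequence_variations_alt sequence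
instance (sequence : String) (out : List String) : Decidable (Spec_generate_sequence_variations sequence out) := by unfold Spec_generate_sequence_variations; infer_instance

-- ===== CLAIM (what is proved, stated in full; the proofs are below) =====
def Claim_equal_generate_sequence_variations : Prop := ∀ (sequence : String), Dom_generate_sequence_variations sequence → Spec_generate_sequence_variations sequence (generate_sequence_variations sequence)

-- ===== LEMMAS AND PROOFS =====

-- s.count('N') for a one-character needle is the character count
lemma count_go_singleton (c : Char) :
    ∀ (fuel : Nat) (s : List Char) (acc : Nat), s.length ≤ fuel →
      PySem.Chars.count.go [c] fuel s acc = acc + s.count c := by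
  intro fuel
  induction fuel with
  | zero =>
    intro s acc h
    cases s with
    | nil => simp [PySem.Chars.count.go]
    | cons x t => simp at h
  | succ n ih =>
    intro s acc h
    cases s with
    | nil => simp [PySem.Chars.count.go]
    | cons x t =>
      simp only [PySem.Chars.count.go]
      by_cases hx : c = x
      · subst hx
        simp only [List.isPrefixOf, BEq.rfl, Bool.true_and, if_pos]
        rw [ih _ _ (by simpa using h)]
        simp
        omega
      · have hpf : ([c].isPrefixOf (x :: t)) = false := by
          simp only [List.isPrefixOf, Bool.and_true]
          exact beq_eq_false_iff_ne.mpr hx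
        rw [hpf]
        simp only [Bool.false_eq_true, if_false]
        rw [ih _ _ (by simpa using h)]
        simp [Ne.symm hx]

lemma chars_count_singleton (cs : List Char) (c : Char) :
    PySem.Chars.count cs [c] = cs.count c := by
  simp [PySem.Chars.count]
  have h := count_go_singleton c cs.length cs 0 le_rfl
  omega

-- structural description of A's n_positions
def pvPosN : List Char → List Nat
  | [] => []
  | c :: cs => if c = 'N' then 0 :: (pvPosN cs).map (· + 1) else (pvPosN cs).map (· + 1)

lemma posA_eq (cs : List Char) : ∀ (k : Nat),
    (PySem.List.enumerate cs (k : Int)).filterMap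
        (fun p => if p.2 = 'N' then some p.1.toNat else none)
      = (pvPosN cs).map (· + k) := by
  induction cs with
  | nil => intro k; simp [PySem.List.enumerate_nil, pvPosN]
  | cons c cs ih =>
    intro k
    have h1 : ((k : Int) + 1) = ((k + 1 : Nat) : Int) := by push_cast; ring
    have tail := ih (k + 1)
    have hmap : (pvPosN cs).map (· + (k + 1)) = ((pvPosN cs).map (· + 1)).map (· + k) := by
      rw [List.map_map]
      exact List.map_congr_left (fun x _ => by simp [Function.comp]; omega)
    rw [PySem.List.enumerate_cons, List.filterMap_cons, h1, tail, hmap]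
    by_cases hc : c = 'N'
    · subst hc
      simp only [reduceIte, pvPosN, List.map_cons, Int.toNat_natCast, Nat.zero_add]
    · simp only [if_neg hc, pvPosN]

-- setting only shifted positions leaves the head alone
lemma pvApply_shift (ps : List Nat) : ∀ (combo : List Char) (c : Char) (cs : List Char),
    pvApply (c :: cs) (ps.map (· + 1)) combo = c :: pvApply cs ps combo := by
  induction ps with
  | nil => intro combo c cs; simp [pvApply]
  | cons p ps ih =>
    intro combo c cs
    cases combo with
    | nil => simp [pvApply]
    | cons nt combo => simpa [pvApply] using ih combo c (cs.set p nt)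

-- the heart: A's combo substitution enumerated in product order IS B's recursion
lemma main_lemma : ∀ (cs : List Char),
    (pvProdRep (cs.count 'N')).map (fun combo => pvApply cs (pvPosN cs) combo) = pvExpand cs := by
  intro cs
  induction cs with
  | nil => simp [pvProdRep, pvExpand, pvApply]
  | cons c cs ih =>
    by_cases hc : c = 'N'
    · subst hc
      have hcount : (('N' :: cs).count 'N') = cs.count 'N' + 1 := by simp
      rw [hcount]
      simp only [pvProdRep, pvExpand, pvPosN, List.map_flatMap, List.map_map]
      refine List.flatMap_congr (fun nt _ => ?_)
      have hstep : ∀ combo, pvApply ('N' :: cs) (0 :: (pvPosN cs).map (· + 1)) (nt :: combo)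
          = nt :: pvApply cs (pvPosN cs) combo := by
        intro combo
        show pvApply (nt :: cs) ((pvPosN cs).map (· + 1)) combo = nt :: pvApply cs (pvPosN cs) combo
        exact pvApply_shift (pvPosN cs) combo nt cs
      calc (pvProdRep (cs.count 'N')).map
              ((fun combo => pvApply ('N' :: cs) (0 :: (pvPosN cs).map (· + 1)) combo) ∘ (nt :: ·))
          = (pvProdRep (cs.count 'N')).map ((nt :: ·) ∘ fun combo => pvApply cs (pvPosN cs) combo) := by
            refine List.map_congr_left (fun combo _ => ?_)
            simpa [Function.comp] using hstep combo
        _ = (pvExpand cs).map (nt :: ·) := by rw [← ih, List.map_map]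
    · have hcount : ((c :: cs).count 'N') = cs.count 'N' := by simp [hc]
      rw [hcount]
      simp only [pvExpand, pvPosN, if_neg hc]
      rw [← ih, List.map_map]
      refine List.map_congr_left (fun combo _ => ?_)
      simpa [Function.comp] using pvApply_shift (pvPosN cs) combo c cs

-- ===== VERDICT (by name: the statement is the Claim_ definition above) =====
theorem generate_sequence_variations_spec : Claim_equal_generate_sequence_variations := by
  intro sequence _
  unfold Spec_generate_sequence_variations
  have hc : PySem.Str.count sequence "N" = sequence.toList.count 'N' := by
    rw [PySem.Str.count_eq]
    exact chars_count_singleton sequence.toList 'N'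
  simp only [generate_sequence_variations, generate_sequence_variations_alt, hc]
  by_cases h5 : sequence.toList.count 'N' > 5
  · rw [if_pos h5, if_pos (Or.inl h5)]
  · rw [if_neg h5]
    by_cases h0 : sequence.toList.count 'N' = 0
    · rw [if_pos h0, if_pos (Or.inr h0)]
    · rw [if_neg h0,
        if_neg (by tauto : ¬(sequence.toList.count 'N' > 5 ∨ sequence.toList.count 'N' = 0))]
      have hpos : (PySem.List.enumerate sequence.toList).filterMap
          (fun p => if p.2 = 'N' then some p.1.toNat else none) = pvPosN sequence.toList := by
        simpa using posA_eq sequence.toList 0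
      rw [PySem.List.foldl_append_singleton_eq_map, hpos, ← main_lemma sequence.toList,
        List.map_map]
      simp [Function.comp]
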